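-- pv_equiv track=rewrite | github.com/AlejandroDiBattista/Lab4-C7 | practicos/28 - 59072 - Rodríguez, Ana Paula/tp2/ejercicio_3.py | expresion_valida
-- ===== SOURCE A (Python) =====
-- def expresion_valida(tokens):
--     esperando_numeros = True
--     n = len(tokens)
--     for i in range(n):
--         token = tokens[i]
--         if token.isdigit():
--             esperando_numeros = False
--         elif token == '(':
--             j = i + 1
--             nivel_par = 1
--             while j < n and nivel_par > 0:
--                 if tokens[j] == '(':
--                     nivel_par += 1
--                 elif tokens[j] == ')':
--                     nivel_par -= 1
--                 j += 1
--             if nivel_par != 0: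
--                 return False
--             if not expresion_valida(tokens[i + 1:j - 1]):
--                 return False
--             esperando_numeros = False
--             i = j - 1
--         elif token == ')':
--             return False
--         elif token in "+-*/":
--             if esperando_numeros:
--                 return False
--             esperando_numeros = True
--         else:
--             return False
--     return not esperando_numeros
-- ===== SOURCE B (Python) =====
-- def expresion_valida(tokens):
--     # Declarative check: classify each token once, then test the shape of the
--     # kind string (no recursion, no index bookkeeping; any parenthesis is an
--     # unknown kind, which matches A, whose scan always ends in False on parens).
--     kinds = ['n' if t.isdigit() else 'o' if t in "+-*/" else 'x' for t in tokens]
--     if not kinds or 'x' in kinds: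
--         return False
--     if kinds[0] == 'o' or kinds[-1] == 'o':
--         return False
--     return all(not (a == 'o' and b == 'o') for a, b in zip(kinds, kinds[1:]))
-- ===== Notes on version B (the rewrite author's own statement) =====
-- stated objective: simpler
-- what changed: Replaces A's recursive parenthesis-matching scan with stateful index/level bookkeeping by a single declarative check: classify each token once into number/operator/other and test the shape of that kind list (nonempty, no unknown kind, no leading/trailing operator, no two adjacent operators), which coincides with A because A's scan always ends in False whenever a parenthesis occurs.
import Mathlib
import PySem

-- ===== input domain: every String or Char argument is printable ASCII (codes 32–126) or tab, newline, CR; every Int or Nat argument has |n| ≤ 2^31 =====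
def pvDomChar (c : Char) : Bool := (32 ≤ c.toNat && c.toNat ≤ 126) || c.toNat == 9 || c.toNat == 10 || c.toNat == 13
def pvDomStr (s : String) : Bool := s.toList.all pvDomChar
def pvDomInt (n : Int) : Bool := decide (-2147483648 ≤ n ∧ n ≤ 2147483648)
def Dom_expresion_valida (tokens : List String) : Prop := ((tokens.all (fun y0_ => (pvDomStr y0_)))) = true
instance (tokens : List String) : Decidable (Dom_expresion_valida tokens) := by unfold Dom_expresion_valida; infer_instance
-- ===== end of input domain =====

-- B replaces A's recursive paren-matching index scan by a declarative shape check on a token-kind list; objective: simpler.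

-- ===== PORT A =====
-- inner 'while j < n and nivel_par > 0' loop of A; returns (final j, final nivel_par)
def evWhile (tokens : List String) (j : Nat) (nivel : Int) : Nat × Int :=
  if h : j < tokens.length ∧ nivel > 0 then
    if tokens[j]'h.1 == "(" then evWhile tokens (j + 1) (nivel + 1)
    else if tokens[j]'h.1 == ")" then evWhile tokens (j + 1) (nivel - 1)
    else evWhile tokens (j + 1) nivel
  else (j, nivel)
termination_by tokens.length - j

-- termination helper for the recursive call on the slice tokens[i+1 : j-1]
theorem pvSliceLen (tokens : List String) (i : Nat) (b : Int) (hi : i < tokens.length) :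
    (PySem.List.slice tokens (some ((i : Int) + 1)) (some b)).length < tokens.length := by
  have hcast : ((i : Int) + 1) = ((i + 1 : Nat) : Int) := by push_cast; ring
  rw [hcast, PySem.List.length_slice, PySem.List.clampIdx_natCast]
  have := PySem.List.clampIdx_le tokens.length b
  omega

-- the 'for i in range(n)' loop of A, carrying esperando_numeros; A's recursive call
-- 'expresion_valida(tokens[i+1:j-1])' restarts this same loop at index 0 on the slice
def evLoop (tokens : List String) (i : Nat) (esperando : Bool) : Bool :=
  if h : i < tokens.length then
    let token := tokens[i]'h
    if PySem.Str.strIsdigit token then evLoop tokens (i + 1) false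
    else if token == "(" then
      let jn := evWhile tokens (i + 1) 1
      if jn.2 ≠ 0 then false
      else if !(evLoop (PySem.List.slice tokens (some ((i : Int) + 1)) (some ((jn.1 : Int) - 1))) 0 true) then false
      else evLoop tokens (i + 1) false
    else if token == ")" then false
    else if PySem.Str.isIn token "+-*/" then
      if esperando then false else evLoop tokens (i + 1) true
    else false
  else !esperando
termination_by (tokens.length, tokens.length - i)
decreasing_by
  · exact Prod.Lex.right _ (by omega)
  · exact Prod.Lex.left _ _ (pvSliceLen tokens i _ h)
  · exact Prod.Lex.right _ (by omega)
  · exact Prod.Lex.right _ (by omega)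

def expresion_valida (tokens : List String) : Bool :=
  evLoop tokens 0 true

-- ===== PORT B =====
-- classify one token: number / operator (a substring of "+-*/", as Python's 'in') / other
def evKind (t : String) : Char :=
  if PySem.Str.strIsdigit t then 'n'
  else if PySem.Str.isIn t "+-*/" then 'o'
  else 'x'

def expresion_valida_alt (tokens : List String) : Bool :=
  let kinds := tokens.map evKind
  if kinds.isEmpty || kinds.contains 'x' then false
  else if kinds.head? == some 'o' || kinds.getLast? == some 'o' then false
  else (kinds.zip kinds.tail).all (fun p => !(p.1 == 'o' && p.2 == 'o'))

-- ===== PRECONDITION & SPEC =====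
def Spec_expresion_valida (tokens : List String) (out : Bool) : Prop := out = expresion_valida_alt tokens
instance (tokens : List String) (out : Bool) : Decidable (Spec_expresion_valida tokens out) := by unfold Spec_expresion_valida; infer_instance

-- ===== CLAIM (what is proved, stated in full; the proofs are below) =====
def Claim_equal_expresion_valida : Prop := ∀ (tokens : List String), Dom_expresion_valida tokens → Spec_expresion_valida tokens (expresion_valida tokens)

-- ===== LEMMAS AND PROOFS =====

-- abstract form of A's scan: it looks at each token only through its kind
def kscan : List Char → Bool → Bool
  | [], esp => !esp
  | k :: ks, esp =>
    if k = 'n' then kscan ks false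
    else if k = 'o' then (if esp then false else kscan ks true)
    else false

theorem kscan_of_mem_x : ∀ (ks : List Char) (esp : Bool), 'x' ∈ ks → kscan ks esp = false := by
  intro ks
  induction ks with
  | nil => intro esp h; simp at h
  | cons k ks ih =>
    intro esp h
    by_cases hn : k = 'n'
    · subst hn
      have : 'x' ∈ ks := by simpa using h
      simp [kscan, ih _ this]
    · by_cases ho : k = 'o'
      · subst ho
        have : 'x' ∈ ks := by simpa using h
        cases esp <;> simp [kscan, ih _ this]
      · simp [kscan, hn, ho]

-- if the inner while loop brought the level from positive down to 0, it passed a ")"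
theorem evWhile_close : ∀ (m : Nat) (tokens : List String) (j : Nat) (nivel : Int),
    tokens.length - j ≤ m → 0 < nivel → (evWhile tokens j nivel).2 = 0 →
    ∃ k, j ≤ k ∧ ∃ (h : k < tokens.length), tokens[k]'h = ")" := by
  intro m
  induction m with
  | zero =>
    intro tokens j nivel hm hp h0
    rw [evWhile] at h0
    have hj : ¬ j < tokens.length := by omega
    simp [hj] at h0
    omega
  | succ m ih =>
    intro tokens j nivel hm hp h0
    rw [evWhile] at h0
    by_cases hj : j < tokens.length
    · simp only [hj, hp, and_true, dif_pos] at h0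
      by_cases hop : tokens[j]'hj == "("
      · rw [if_pos hop] at h0
        obtain ⟨k, hk1, hk2⟩ := ih tokens (j+1) (nivel+1) (by omega) (by omega) h0
        exact ⟨k, by omega, hk2⟩
      · by_cases hcl : tokens[j]'hj == ")"
        · exact ⟨j, le_refl _, hj, by simpa using hcl⟩
        · rw [if_neg hop, if_neg hcl] at h0
          obtain ⟨k, hk1, hk2⟩ := ih tokens (j+1) nivel (by omega) hp h0
          exact ⟨k, by omega, hk2⟩
    · have : ¬ (j < tokens.length ∧ nivel > 0) := by tauto
      rw [dif_neg this] at h0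
      simp at h0
      omega

theorem evKind_digit (t : String) (h : PySem.Str.strIsdigit t = true) : evKind t = 'n' := by
  unfold evKind; rw [if_pos h]

theorem evKind_op (t : String) (h1 : PySem.Str.strIsdigit t = false)
    (h2 : PySem.Str.isIn t "+-*/" = true) : evKind t = 'o' := by
  unfold evKind; rw [if_neg (by rw [h1]; simp), if_pos h2]

theorem evKind_other (t : String) (h1 : PySem.Str.strIsdigit t = false)
    (h2 : PySem.Str.isIn t "+-*/" = false) : evKind t = 'x' := by
  unfold evKind; rw [if_neg (by rw [h1]; simp), if_neg (by rw [h2]; simp)]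

theorem evKind_lparen : evKind "(" = 'x' := by decide
theorem evKind_rparen : evKind ")" = 'x' := by decide

-- A's loop from index i computes the kind-scan of the remaining tokens
theorem evLoop_eq_kscan : ∀ (m : Nat) (tokens : List String) (i : Nat) (esp : Bool),
    tokens.length - i ≤ m →
    evLoop tokens i esp = kscan ((tokens.drop i).map evKind) esp := by
  intro m
  induction m with
  | zero =>
    intro tokens i esp hm
    have hi : ¬ i < tokens.length := by omega
    rw [evLoop, dif_neg hi, List.drop_eq_nil_of_le (by omega : tokens.length ≤ i)]
    simp [kscan]
  | succ m ih =>
    intro tokens i esp hm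
    by_cases hi : i < tokens.length
    · have hdrop : tokens.drop i = tokens[i]'hi :: tokens.drop (i + 1) :=
        List.drop_eq_getElem_cons hi
      rw [evLoop, dif_pos hi, hdrop, List.map_cons]
      cases hd : PySem.Str.strIsdigit (tokens[i]'hi) with
      | true =>
        rw [if_pos hd, evKind_digit _ hd]
        simp only [kscan]
        exact ih tokens (i+1) false (by omega)
      | false =>
        rw [if_neg (by rw [hd]; simp)]
        by_cases hop : tokens[i]'hi = "("
        · rw [if_pos (by simp [hop])]
          have hk : evKind (tokens[i]'hi) = 'x' := by rw [hop]; exact evKind_lparen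
          rw [hk]
          have hr : kscan ('x' :: (tokens.drop (i+1)).map evKind) esp = false := by
            simp [kscan]
          rw [hr]
          by_cases hz : (evWhile tokens (i+1) 1).2 = 0
          · rw [if_neg (by simp [hz])]
            -- the matching ")" is still scanned by the continuing loop, which gives False
            obtain ⟨k, hk1, hklt, hkv⟩ :=
              evWhile_close (tokens.length - (i+1)) tokens (i+1) 1 (le_refl _) (by omega) hz
            have hmem : (")" : String) ∈ tokens.drop (i+1) := by
              have hlt : k - (i+1) < (tokens.drop (i+1)).length := by
                simp only [List.length_drop]; omega
              have hgd : (tokens.drop (i+1))[k - (i+1)]'hlt = tokens[k]'hklt := by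
                rw [List.getElem_drop]
                congr 1
                omega
              rw [← hkv, ← hgd]
              exact List.getElem_mem hlt
            have hxm : 'x' ∈ (tokens.drop (i+1)).map evKind := by
              rw [← evKind_rparen]
              exact List.mem_map_of_mem hmem
            cases hrec : evLoop (PySem.List.slice tokens (some ((i:Int) + 1))
                (some (((evWhile tokens (i+1) 1).1 : Int) - 1))) 0 true with
            | false => rw [if_pos (by simp)]
            | true =>
              rw [if_neg (by simp)]
              exact (ih tokens (i+1) false (by omega)).trans (kscan_of_mem_x _ _ hxm)
          · rw [if_pos (by simp [hz])]
        · rw [if_neg (by simp [hop])]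
          by_cases hcl : tokens[i]'hi = ")"
          · rw [if_pos (by simp [hcl])]
            have hk : evKind (tokens[i]'hi) = 'x' := by rw [hcl]; exact evKind_rparen
            rw [hk]
            simp [kscan]
          · rw [if_neg (by simp [hcl])]
            cases hin : PySem.Str.isIn (tokens[i]'hi) "+-*/" with
            | true =>
              rw [if_pos rfl, evKind_op _ hd hin]
              cases esp with
              | true => simp [kscan]
              | false => simpa [kscan] using ih tokens (i+1) true (by omega)
            | false =>
              rw [if_neg (by simp), evKind_other _ hd hin]
              simp [kscan]
    · rw [evLoop, dif_neg hi, List.drop_eq_nil_of_le (by omega : tokens.length ≤ i)]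
      simp [kscan]

-- boolean shape predicates matching B's checks
def noOO : List Char → Bool
  | [] => true
  | [_] => true
  | a :: b :: ks => !(a == 'o' && b == 'o') && noOO (b :: ks)

def headOk : List Char → Bool
  | [] => false
  | k :: _ => k != 'o'

theorem kscan_eq (ks : List Char) (esp : Bool) :
    kscan ks esp =
      (ks.all (fun k => k == 'n' || k == 'o') && (ks.getLast? != some 'o') && noOO ks
        && (!esp || headOk ks)) := by
  induction ks generalizing esp with
  | nil => cases esp <;> simp [kscan, noOO, headOk]
  | cons k ks ih =>
    by_cases hn : k = 'n'
    · subst hn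
      rw [show kscan ('n' :: ks) esp = kscan ks false from by simp [kscan]]
      rw [ih false]
      cases ks with
      | nil => cases esp <;> simp [noOO, headOk] <;> decide
      | cons b ks' =>
        cases esp <;> simp [noOO, headOk, List.getLast?_cons_cons, Bool.and_assoc]
    · by_cases ho : k = 'o'
      · subst ho
        cases esp with
        | true => simp [kscan, headOk]
        | false =>
          rw [show kscan ('o' :: ks) false = kscan ks true from by simp [kscan]]
          rw [ih true]
          cases ks with
          | nil => simp [noOO, headOk]
          | cons b ks' =>
            simp only [noOO, headOk, List.getLast?_cons_cons, List.all_cons]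
            cases hb : (b == 'o') with
            | true =>
              have hb' : b = 'o' := by simpa using hb
              subst hb'
              simp
            | false => simp [bne, hb, Bool.and_comm, Bool.and_left_comm]
      · simp [kscan, hn, ho]

theorem noOO_eq_zip_all (ks : List Char) :
    noOO ks = (ks.zip ks.tail).all (fun p => !(p.1 == 'o' && p.2 == 'o')) := by
  induction ks with
  | nil => simp [noOO]
  | cons a ks ih =>
    cases ks with
    | nil => simp [noOO]
    | cons b ks' =>
      simp only [noOO, List.tail_cons, List.zip_cons_cons, List.all_cons, ih]

theorem evKind_range (t : String) : evKind t = 'n' ∨ evKind t = 'o' ∨ evKind t = 'x' := by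
  unfold evKind
  split_ifs <;> simp

theorem allGood_eq_not_contains (ks : List Char)
    (hr : ∀ c ∈ ks, c = 'n' ∨ c = 'o' ∨ c = 'x') :
    (ks.all fun c => c == 'n' || c == 'o') = !ks.contains 'x' := by
  induction ks with
  | nil => simp
  | cons a l ih =>
    simp only [List.all_cons, List.contains_cons, Bool.not_or,
      ih (fun c hc => hr c (List.mem_cons_of_mem a hc))]
    rcases hr a (by simp) with h | h | h <;> subst h <;> simp

-- B's if-chain on an arbitrary kind list (kinds only ever come out of evKind) equals the kind-scan
theorem alt_body (ks : List Char) (hr : ∀ c ∈ ks, c = 'n' ∨ c = 'o' ∨ c = 'x') :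
    (if ks.isEmpty || ks.contains 'x' then false
     else if ks.head? == some 'o' || ks.getLast? == some 'o' then false
     else (ks.zip ks.tail).all (fun p => !(p.1 == 'o' && p.2 == 'o'))) = kscan ks true := by
  cases ks with
  | nil => simp [kscan]
  | cons k l =>
    have hall := allGood_eq_not_contains (k :: l) hr
    rw [kscan_eq]
    cases hcx : (k :: l).contains 'x' with
    | true =>
      have h1 : (k :: l).all (fun c => c == 'n' || c == 'o') = false := by rw [hall, hcx]; rfl
      simp [h1]
    | false =>
      have h1 : (k :: l).all (fun c => c == 'n' || c == 'o') = true := by rw [hall, hcx]; rfl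
      rw [h1]
      by_cases hk : k = 'o'
      · subst hk
        simp [headOk]
      · by_cases hl : (k :: l).getLast? = some 'o'
        · simp [hl, headOk]
        · have hx : ((k :: l).getLast? == some 'o') = false := by simpa using hl
          have hy : (k == 'o') = false := by simpa using hk
          simp [bne, hx, hy, headOk, noOO_eq_zip_all]

theorem alt_eq_kscan (tokens : List String) :
    expresion_valida_alt tokens = kscan (tokens.map evKind) true := by
  unfold expresion_valida_alt
  exact alt_body _ (by
    intro c hc
    obtain ⟨t, _, ht⟩ := List.mem_map.mp hc
    rw [← ht]
    exact evKind_range t)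

-- ===== VERDICT (by name: the statement is the Claim_ definition above) =====
theorem expresion_valida_spec : Claim_equal_expresion_valida := by
  intro tokens _
  unfold Spec_expresion_valida expresion_valida
  rw [alt_eq_kscan, evLoop_eq_kscan tokens.length tokens 0 true (by omega), List.drop_zero]
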